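-- pv_equiv track=rewrite | github.com/UnnMatt/IPscanner | ipscanner.py | keyword_hits
-- ===== SOURCE A (Python) =====
-- def keyword_hits(text, mapping):
--     hits = []
--     score = 0
--
--     for keyword, value in mapping.items():
--         if keyword in text:
--             hits.append((keyword, value))
--             score += value
--
--     return score, hits
-- ===== SOURCE B (Python) =====
-- def keyword_hits(text, mapping):
--     # Index the text once: the set of all substrings whose length is a keyword
--     # length, then answer every keyword by one set lookup.
--     n = len(text)
--     subs = set()
--     for L in {len(k) for k in mapping}:
--         for i in range(n - L + 1):
--             subs.add(text[i:i + L])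
--     hits = [(k, v) for k, v in mapping.items() if k in subs]
--     return sum(v for _, v in hits), hits
-- ===== Notes on version B (the rewrite author's own statement) =====
-- stated objective: faster
-- what changed: Instead of scanning the text once per keyword, B indexes the text once into a hash set of all substrings of the distinct keyword lengths and then answers every keyword by a single O(1) set lookup.
import Mathlib
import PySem

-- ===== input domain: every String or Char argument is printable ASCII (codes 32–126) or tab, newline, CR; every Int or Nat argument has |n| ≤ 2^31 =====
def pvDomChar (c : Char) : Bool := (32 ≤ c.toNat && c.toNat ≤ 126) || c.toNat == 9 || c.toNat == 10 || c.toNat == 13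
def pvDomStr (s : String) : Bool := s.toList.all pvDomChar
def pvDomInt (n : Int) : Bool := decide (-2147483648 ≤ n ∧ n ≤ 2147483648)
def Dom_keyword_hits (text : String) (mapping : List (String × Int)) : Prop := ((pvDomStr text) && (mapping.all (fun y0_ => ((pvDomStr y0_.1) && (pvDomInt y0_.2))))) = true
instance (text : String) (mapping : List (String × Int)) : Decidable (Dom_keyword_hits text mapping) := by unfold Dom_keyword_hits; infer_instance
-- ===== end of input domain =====

-- B replaces A's per-keyword scan of the text by indexing the text once into a set of all
-- substrings of the distinct keyword lengths, then answering each keyword by one set lookup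
-- (objective: alternative algorithm; B builds the index, A rescans the text per keyword).

-- ===== PORT A =====
-- literal port of A: one loop over mapping.items(), 'keyword in text', append + add
def keyword_hits (text : String) (mapping : List (String × Int)) : Int × (List (String × Int)) :=
  let r := mapping.foldl
    (fun (acc : Int × List (String × Int)) kv =>
      if PySem.Str.isIn kv.1 text then (acc.1 + kv.2, acc.2 ++ [kv]) else acc)
    (0, [])
  (r.1, r.2)

-- ===== PORT B =====
-- subs = set(); for L in {len(k) for k in mapping}: for i in range(n-L+1): subs.add(text[i:i+L])
-- (iterating the length set only builds another set, so the result is order-independent)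
def pvSubsB (text : String) (mapping : List (String × Int)) : PySem.Set String :=
  (PySem.Set.ofList (mapping.map (fun kv => PySem.Str.len kv.1))).foldl
    (fun s L =>
      (PySem.List.pyRange 0 (PySem.Str.len text - L + 1)).foldl
        (fun s i => PySem.Set.add s (PySem.Str.slice text (some i) (some (i + L)))) s)
    PySem.Set.empty

def keyword_hits_alt (text : String) (mapping : List (String × Int)) : Int × (List (String × Int)) :=
  let subs := pvSubsB text mapping
  let hits := mapping.filter (fun kv => PySem.Set.contains subs kv.1)
  ((hits.map (fun kv => kv.2)).sum, hits)

-- ===== PRECONDITION & SPEC =====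
def Spec_keyword_hits (text : String) (mapping : List (String × Int)) (out : Int × (List (String × Int))) : Prop := out = keyword_hits_alt text mapping
instance (text : String) (mapping : List (String × Int)) (out : Int × (List (String × Int))) : Decidable (Spec_keyword_hits text mapping out) := by unfold Spec_keyword_hits; infer_instance

-- ===== CLAIM (what is proved, stated in full; the proofs are below) =====
def Claim_equal_keyword_hits : Prop := ∀ (text : String) (mapping : List (String × Int)), Dom_keyword_hits text mapping → Spec_keyword_hits text mapping (keyword_hits text mapping)

-- ===== LEMMAS AND PROOFS =====

-- A's loop is the filter by 'keyword in text' together with the sum of the kept values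
lemma pvFoldA (text : String) (l : List (String × Int)) (s : Int) (h : List (String × Int)) :
    l.foldl
      (fun (acc : Int × List (String × Int)) kv =>
        if PySem.Str.isIn kv.1 text then (acc.1 + kv.2, acc.2 ++ [kv]) else acc)
      (s, h)
    = (s + ((l.filter (fun kv => PySem.Str.isIn kv.1 text)).map (fun kv => kv.2)).sum,
       h ++ l.filter (fun kv => PySem.Str.isIn kv.1 text)) := by
  induction l generalizing s h with
  | nil => simp
  | cons kv t ih =>
    rw [List.foldl_cons]
    by_cases hc : PySem.Str.isIn kv.1 text = true
    · rw [if_pos hc, ih]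
      have hc' : PySem.Chars.isIn kv.1.toList text.toList = true := by simpa using hc
      simp [hc', add_assoc]
    · rw [if_neg hc, ih]
      have hc' : PySem.Chars.isIn kv.1.toList text.toList = false := by
        simpa using hc
      simp [hc']

-- membership in B's substring index, unfolded over the two nested loops
lemma pvMemOuter (text : String) (ls : List Int) (s0 : PySem.Set String) (y : String) :
    y ∈ ls.foldl
      (fun s L =>
        (PySem.List.pyRange 0 (PySem.Str.len text - L + 1)).foldl
          (fun s i => PySem.Set.add s (PySem.Str.slice text (some i) (some (i + L)))) s)
      s0
    ↔ y ∈ s0 ∨ ∃ L ∈ ls, ∃ i ∈ PySem.List.pyRange 0 (PySem.Str.len text - L + 1),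
        y = PySem.Str.slice text (some i) (some (i + L)) := by
  induction ls generalizing s0 with
  | nil => simp
  | cons L t ih =>
    rw [List.foldl_cons, ih]
    rw [PySem.Set.mem_foldl_add]
    constructor
    · rintro ((hy | ⟨i, hi, rfl⟩) | ⟨L', hL', i, hi, rfl⟩)
      · exact Or.inl hy
      · exact Or.inr ⟨L, by simp, i, hi, rfl⟩
      · exact Or.inr ⟨L', by simp [hL'], i, hi, rfl⟩
    · rintro (hy | ⟨L', hL', i, hi, rfl⟩)
      · exact Or.inl (Or.inl hy)
      · rcases List.mem_cons.mp hL' with rfl | hL'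
        · exact Or.inl (Or.inr ⟨i, hi, rfl⟩)
        · exact Or.inr ⟨L', hL', i, hi, rfl⟩

-- a keyword's length is indexed, so index membership = substring of the text
lemma pvMemSubs (text : String) (mapping : List (String × Int)) (k : String)
    (hk : PySem.Str.len k ∈ mapping.map (fun kv => PySem.Str.len kv.1)) :
    k ∈ pvSubsB text mapping ↔ PySem.Str.isIn k text = true := by
  unfold pvSubsB
  rw [pvMemOuter]
  simp only [PySem.Set.empty, List.not_mem_nil, false_or]
  constructor
  · rintro ⟨L, hL, i, hi, rfl⟩
    rw [PySem.List.mem_pyRange_one] at hi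
    -- L is some keyword's length, hence nonnegative
    have hL0 : 0 ≤ L := by
      rw [PySem.Set.mem_ofList, List.mem_map] at hL
      rcases hL with ⟨kv, _, rfl⟩
      simp [PySem.Str.len]
    rw [PySem.Str.isIn_iff_infix]
    have hts : (PySem.Str.slice text (some i) (some (i + L))).toList
        = List.take ((i + L).toNat - i.toNat) (List.drop i.toNat text.toList) := by
      rw [PySem.Str.toList_slice, PySem.Chars.slice_eq_listSlice,
        PySem.List.slice_toNat _ hi.1 (by omega)]
    rw [hts]
    exact (List.take_prefix _ _).isInfix.trans (List.drop_suffix _ _).isInfix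
  · intro hin
    rw [PySem.Str.isIn_iff_infix] at hin
    rcases hin with ⟨u, v, huv⟩
    refine ⟨PySem.Str.len k, by rw [PySem.Set.mem_ofList]; exact hk,
      (u.length : Int), ?_, ?_⟩
    · rw [PySem.List.mem_pyRange_one]
      have hlen : text.toList.length = u.length + k.toList.length + v.length := by
        rw [← huv]; simp; omega
      constructor
      · positivity
      · simp only [PySem.Str.len, String.length_toList] at *
        omega
    · rw [← String.toList_inj]
      rw [PySem.Str.toList_slice, PySem.Chars.slice_eq_listSlice,
        PySem.List.slice_toNat _ (by positivity) (by simp [PySem.Str.len]; positivity)]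
      have h1 : ((u.length : Int) + PySem.Str.len k).toNat - (u.length : Int).toNat
          = k.toList.length := by
        simp [PySem.Str.len, String.length_toList]
        omega
      rw [h1, ← huv, List.append_assoc]
      simp only [Int.toNat_natCast]
      rw [List.drop_left, List.take_left]

-- ===== VERDICT (by name: the statement is the Claim_ definition above) =====
theorem keyword_hits_spec : Claim_equal_keyword_hits := by
  intro text mapping _
  show _ = _
  unfold keyword_hits keyword_hits_alt
  rw [pvFoldA]
  have hfc : mapping.filter (fun kv => decide (kv.1 ∈ pvSubsB text mapping))
      = mapping.filter (fun kv => PySem.Chars.isIn kv.1.toList text.toList) := by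
    apply List.filter_congr
    intro kv hkv
    rw [Bool.eq_iff_iff, decide_eq_true_iff,
      pvMemSubs text mapping kv.1 (List.mem_map_of_mem hkv)]
    simp
  simp [hfc]
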